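-- pv_equiv track=rewrite | github.com/kpisupati07/CSPython | CompSci/pset4d/alphabetical.py | alphabetical
-- ===== SOURCE A (Python) =====
-- def alphabetical(words):
--     """Takes the a list of words and returns a list of strings
--     with each of the letters in each word sorted in alphabetical
--     (not unicode!) order.
--     For example, the for the parameter
--     ['apple', 'pumpkin', 'log', 'River', 'fox', 'pond']
--     the return value should be
--     ['aelpp', 'ikmnppu', 'glo', 'eiRrv', 'fox', 'dnop']
--     """
--
--     # Define a function that sorts each word in a list of words in alphabetical order
--     def sort_word(word):
--         chars = list(word)  # makes it into list of letters
--         n = len(chars)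
--         for i in range(n):
--             for j in range(n - i - 1):  # makes it not sort already sored letters again
--                 # see if one word is earlier in the alphabet than another
--                 if ord(chars[j].lower()) > ord(chars[j + 1].lower()):
--                     # swithces order of them if its out of order
--                     chars[j], chars[j + 1] = chars[j + 1], chars[j]
--         # makes it back into a string
--         return "".join(chars)
--
--     sorted_words = []
--     for i in range(len(words)):
--         # get each word
--         word = words[i]
--         # sorts words, and then put it into a list
--         sorted_words.append(sort_word(word))
--     return sorted_words
-- ===== SOURCE B (Python) =====
-- def alphabetical(words):
--     def sort_word(word):
--         # group-by: concatenate, for each distinct case-folded code in ascending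
--         # order, the characters of the word that fold to it (input order kept)
--         keys = sorted({ord(c.lower()) for c in word})
--         return "".join(c for k in keys for c in word if ord(c.lower()) == k)
--     return [sort_word(word) for word in words]
-- ===== Notes on version B (the rewrite author's own statement) =====
-- stated objective: alternative
-- what changed: Replaces the per-word index-swapping bubble sort with a group-by: collect, for each distinct case-folded character code in ascending order, the word's characters that fold to it (input order preserved inside a group).
import Mathlib
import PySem

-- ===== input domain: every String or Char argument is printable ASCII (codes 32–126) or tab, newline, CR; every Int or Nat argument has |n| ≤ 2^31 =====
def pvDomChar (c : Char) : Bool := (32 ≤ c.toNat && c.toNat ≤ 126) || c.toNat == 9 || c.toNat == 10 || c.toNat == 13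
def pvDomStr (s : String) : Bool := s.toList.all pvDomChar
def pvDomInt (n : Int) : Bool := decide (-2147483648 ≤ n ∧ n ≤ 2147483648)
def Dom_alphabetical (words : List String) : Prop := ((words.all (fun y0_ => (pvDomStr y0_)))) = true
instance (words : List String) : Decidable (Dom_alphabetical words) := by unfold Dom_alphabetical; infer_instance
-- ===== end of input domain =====

-- B replaces A's per-word bubble sort by a group-by: concatenate, per ascending case-folded
-- character code, the characters of the word that fold to it (objective: alternative algorithm).

-- ord(c.lower()); exact for the ASCII characters of Dom_alphabetical (where c.lower() is a single char)
def pvKey (c : Char) : Int := ((PySem.Chars.lowerChar c).toNat : Int)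

-- ===== PORT A =====
-- chars[j] / chars[j+1] are read via pyGetD: every index the loops produce is in range, so this is exact
def pvSortWord (word : String) : String :=
  let chars := word.toList
  let n : Int := (chars.length : Int)
  let chars :=
    (PySem.List.pyRange 0 n 1).foldl (fun cs i =>
      (PySem.List.pyRange 0 (n - i - 1) 1).foldl (fun cs j =>
        if pvKey (PySem.List.pyGetD cs j ' ') > pvKey (PySem.List.pyGetD cs (j+1) ' ')
        then (cs.set j.toNat (PySem.List.pyGetD cs (j+1) ' ')).set (j.toNat+1)
               (PySem.List.pyGetD cs j ' ')
        else cs) cs) chars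
  String.ofList chars

def alphabetical (words : List String) : List String :=
  (PySem.List.pyRange 0 (words.length : Int) 1).foldl
    (fun acc i => acc ++ [pvSortWord (PySem.List.pyGetD words i "")]) []

-- ===== PORT B =====
def pvSortWordB (word : String) : String :=
  let keys := PySem.List.sorted (PySem.Set.ofList (word.toList.map pvKey)) (fun x => x) false
  String.ofList (keys.flatMap (fun k => word.toList.filter (fun c => pvKey c == k)))

def alphabetical_alt (words : List String) : List String := words.map pvSortWordB

-- ===== PRECONDITION & SPEC =====
def Spec_alphabetical (words : List String) (out : List String) : Prop := out = alphabetical_alt words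
instance (words : List String) (out : List String) : Decidable (Spec_alphabetical words out) := by unfold Spec_alphabetical; infer_instance

-- ===== CLAIM (what is proved, stated in full; the proofs are below) =====
def Claim_equal_alphabetical : Prop := ∀ (words : List String), Dom_alphabetical words → Spec_alphabetical words (alphabetical words)

-- ===== LEMMAS AND PROOFS =====

def pvBpass : List Char → List Char
  | [] => []
  | [a] => [a]
  | a :: b :: t => if pvKey a > pvKey b then b :: pvBpass (a :: t) else a :: pvBpass (b :: t)

theorem pvBpass_length (cs : List Char) : (pvBpass cs).length = cs.length := by
  induction cs using pvBpass.induct with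
  | case1 => simp [pvBpass]
  | case2 a => simp [pvBpass]
  | case3 a b t h ih => simp [pvBpass, h, ih]
  | case4 a b t h ih => simp [pvBpass, h, ih]

theorem pvBpass_mem {x : Char} {cs : List Char} (h : x ∈ pvBpass cs) : x ∈ cs := by
  induction cs using pvBpass.induct with
  | case1 => simp [pvBpass] at h
  | case2 a => simpa [pvBpass] using h
  | case3 a b t hc ih =>
    simp only [pvBpass, if_pos hc, List.mem_cons] at h
    rcases h with h | h
    · simp [h]
    · have := ih h; simp at this ⊢; tauto
  | case4 a b t hc ih =>
    simp only [pvBpass, if_neg hc, List.mem_cons] at h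
    rcases h with h | h
    · simp [h]
    · have := ih h; simp at this ⊢; tauto

theorem pvBpass_filter (k : Int) (cs : List Char) :
    (pvBpass cs).filter (fun c => pvKey c == k) = cs.filter (fun c => pvKey c == k) := by
  induction cs using pvBpass.induct with
  | case1 => simp [pvBpass]
  | case2 a => simp [pvBpass]
  | case3 a b t hc ih =>
    simp only [pvBpass, if_pos hc]
    simp only [List.filter_cons, ih, List.filter_cons]
    by_cases h1 : pvKey a = k <;> by_cases h2 : pvKey b = k <;> simp_all
  | case4 a b t hc ih =>
    simp only [pvBpass, if_neg hc, List.filter_cons, ih]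

theorem pvBpass_append_last (P : List Char) (y : Char) (hP : P ≠ []) :
    ∃ Q l, pvBpass P = Q ++ [l] ∧
      pvBpass (P ++ [y]) = Q ++ (if pvKey l > pvKey y then [y, l] else [l, y]) := by
  induction P using pvBpass.induct generalizing y with
  | case1 => exact absurd rfl hP
  | case2 a =>
    refine ⟨[], a, by simp [pvBpass], ?_⟩
    by_cases h : pvKey a > pvKey y <;> simp [pvBpass, h]
  | case3 a b t hc ih =>
    obtain ⟨Q, l, h1, h2⟩ := ih y (by simp)
    refine ⟨b :: Q, l, by simp [pvBpass, hc, h1], ?_⟩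
    show pvBpass (a :: b :: (t ++ [y])) = _
    simp only [pvBpass, if_pos hc, List.cons_append]
    rw [show a :: (t ++ [y]) = (a :: t) ++ [y] by simp, h2]
  | case4 a b t hc ih =>
    obtain ⟨Q, l, h1, h2⟩ := ih y (by simp)
    refine ⟨a :: Q, l, by simp [pvBpass, hc, h1], ?_⟩
    show pvBpass (a :: b :: (t ++ [y])) = _
    simp only [pvBpass, if_neg hc, List.cons_append]
    rw [show b :: (t ++ [y]) = (b :: t) ++ [y] by simp, h2]

theorem pvBpass_last_max (cs Q : List Char) (l : Char) (h : pvBpass cs = Q ++ [l]) :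
    ∀ x ∈ cs, pvKey x ≤ pvKey l := by
  induction cs using pvBpass.induct generalizing Q l with
  | case1 => simp
  | case2 a =>
    have h2 : [a] = Q ++ [l] := by simpa [pvBpass] using h
    have hl : a = l := by rcases Q with _ | ⟨q, Q⟩ <;> simp_all
    simp [hl]
  | case3 a b t hc ih =>
    simp only [pvBpass, if_pos hc] at h
    have hne : pvBpass (a :: t) ≠ [] := by
      have := pvBpass_length (a :: t); intro hnil; simp [hnil] at this
    rcases Q with _ | ⟨q, Q⟩
    · simp at h; exact absurd h.2 hne
    · simp at h
      have ihm := ih Q l h.2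
      intro x hx
      simp only [List.mem_cons] at hx
      rcases hx with rfl | rfl | hx
      · exact ihm x (by simp)
      · exact le_trans (le_of_lt hc) (ihm a (by simp))
      · exact ihm x (by simp [hx])
  | case4 a b t hc ih =>
    simp only [pvBpass, if_neg hc] at h
    have hne : pvBpass (b :: t) ≠ [] := by
      have := pvBpass_length (b :: t); intro hnil; simp [hnil] at this
    rcases Q with _ | ⟨q, Q⟩
    · simp at h; exact absurd h.2 hne
    · simp at h
      have ihm := ih Q l h.2
      intro x hx
      simp only [List.mem_cons] at hx
      rcases hx with rfl | hx
      · exact le_trans (by omega) (ihm b (by simp))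
      · exact ihm x (by simpa using hx)

def pvStepN (cs : List Char) (j : Nat) : List Char :=
  if pvKey (cs.getD j ' ') > pvKey (cs.getD (j+1) ' ')
  then (cs.set j (cs.getD (j+1) ' ')).set (j+1) (cs.getD j ' ')
  else cs

def pvPass (cs : List Char) : Nat → List Char
  | 0 => cs
  | m+1 => pvStepN (pvPass cs m) m

theorem pv_getD_append_at {α : Type} [Inhabited α] (Q : List α) (x : α) (rest : List α) (d : α) :
    (Q ++ x :: rest).getD Q.length d = x := by
  simp [List.getD]

theorem pv_set_append_at {α : Type} (Q : List α) (x : α) (rest : List α) (v : α) :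
    (Q ++ x :: rest).set Q.length v = Q ++ v :: rest := by
  induction Q with
  | nil => simp
  | cons q Q ih => simp [List.set_cons_succ, ih]

theorem pvPass_eq_bpass (m : Nat) (cs : List Char) (h : m < cs.length) :
    pvPass cs m = pvBpass (cs.take (m+1)) ++ cs.drop (m+1) := by
  induction m with
  | zero =>
    rcases cs with _ | ⟨c, t⟩
    · simp at h
    · simp [pvPass, pvBpass]
  | succ m ih =>
    have hm : m < cs.length := by omega
    have hP : cs.take (m+1) ≠ [] := by
      rw [Ne, List.take_eq_nil_iff]
      push Not
      exact ⟨by omega, by intro hc; rw [hc] at h; simp at h⟩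
    rcases hd : cs.drop (m+1) with _ | ⟨r, D⟩
    · rw [List.drop_eq_nil_iff] at hd; omega
    have hD : D = cs.drop (m+2) := by
      have ht : (cs.drop (m+1)).tail = cs.drop (m+2) := List.tail_drop
      rw [hd] at ht
      exact ht
    subst hD
    have htake : cs.take (m+2) = cs.take (m+1) ++ [r] := by
      have h2 : cs.take (m+1+1) = cs.take (m+1) ++ (cs.drop (m+1)).take 1 := List.take_add
      rw [hd] at h2
      simpa using h2
    obtain ⟨Q, l, h1, h2⟩ := pvBpass_append_last (cs.take (m+1)) r hP
    have hQlen : Q.length = m := by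
      have hlen := pvBpass_length (cs.take (m+1))
      rw [h1] at hlen
      simp at hlen
      omega
    have lhs : pvPass cs (m+1) = pvStepN (Q ++ l :: r :: cs.drop (m+2)) m := by
      show pvStepN (pvPass cs m) m = _
      rw [ih hm, h1, hd]
      simp
    rw [lhs, htake, h2]
    unfold pvStepN
    have g1 : (Q ++ l :: r :: cs.drop (m+2)).getD m ' ' = l := by
      rw [← hQlen]; exact pv_getD_append_at Q l _ ' '
    have g2 : (Q ++ l :: r :: cs.drop (m+2)).getD (m+1) ' ' = r := by
      rw [show Q ++ l :: r :: cs.drop (m+2) = (Q ++ [l]) ++ r :: cs.drop (m+2) by simp,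
          show m + 1 = (Q ++ [l]).length by simp [hQlen]]
      exact pv_getD_append_at _ _ _ ' '
    rw [g1, g2]
    by_cases hcond : pvKey l > pvKey r
    · rw [if_pos hcond, if_pos hcond]
      rw [show (Q ++ l :: r :: cs.drop (m+2)).set m r = Q ++ r :: r :: cs.drop (m+2) from by
            rw [← hQlen]; exact pv_set_append_at Q l _ r]
      rw [show Q ++ r :: r :: cs.drop (m+2) = (Q ++ [r]) ++ r :: cs.drop (m+2) by simp,
          show m + 1 = (Q ++ [r]).length by simp [hQlen]]
      rw [pv_set_append_at]
      simp [hQlen]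
    · rw [if_neg hcond, if_neg hcond]
      simp

def pvOuter (cs : List Char) (n : Nat) : Nat → List Char
  | 0 => cs
  | i+1 => pvPass (pvOuter cs n i) (n - i - 1)

def pvSortedK (ys : List Char) : Prop := ys.Pairwise (fun a b => pvKey a ≤ pvKey b)

theorem pvOuter_length (cs : List Char) (i : Nat) (hi : i ≤ cs.length) :
    (pvOuter cs cs.length i).length = cs.length := by
  induction i with
  | zero => rfl
  | succ i ih =>
    have ihl := ih (by omega)
    show (pvPass (pvOuter cs cs.length i) (cs.length - i - 1)).length = _
    rw [pvPass_eq_bpass _ _ (by omega)]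
    simp [pvBpass_length, ihl]
    omega

theorem pvOuter_filter (cs : List Char) (i : Nat) (hi : i ≤ cs.length) (k : Int) :
    (pvOuter cs cs.length i).filter (fun c => pvKey c == k) = cs.filter (fun c => pvKey c == k) := by
  induction i with
  | zero => rfl
  | succ i ih =>
    have ihf := ih (by omega)
    have hlen := pvOuter_length cs i (by omega)
    show (pvPass (pvOuter cs cs.length i) (cs.length - i - 1)).filter _ = _
    rw [pvPass_eq_bpass _ _ (by omega), List.filter_append, pvBpass_filter,
        ← List.filter_append, List.take_append_drop]
    exact ihf

theorem pvOuter_inv (cs : List Char) (i : Nat) (hi : i ≤ cs.length) :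
    pvSortedK ((pvOuter cs cs.length i).drop (cs.length - i)) ∧
    (∀ a ∈ (pvOuter cs cs.length i).take (cs.length - i),
      ∀ b ∈ (pvOuter cs cs.length i).drop (cs.length - i), pvKey a ≤ pvKey b) := by
  induction i with
  | zero =>
    constructor
    · show pvSortedK ((pvOuter cs cs.length 0).drop (cs.length - 0))
      have : (pvOuter cs cs.length 0).drop (cs.length - 0) = [] := by
        apply List.drop_eq_nil_iff.mpr; simp [pvOuter]
      rw [this]; exact List.Pairwise.nil
    · intro a _ b hb
      have : (pvOuter cs cs.length 0).drop (cs.length - 0) = [] := by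
        apply List.drop_eq_nil_iff.mpr; simp [pvOuter]
      rw [this] at hb; simp at hb
  | succ i ih =>
    obtain ⟨hsort, hle⟩ := ih (by omega)
    have hlen := pvOuter_length cs i (by omega)
    set ys := pvOuter cs cs.length i with hys
    have hstep : pvOuter cs cs.length (i+1) = pvBpass (ys.take (cs.length - i)) ++ ys.drop (cs.length - i) := by
      show pvPass ys (cs.length - i - 1) = _
      rw [pvPass_eq_bpass _ _ (by omega)]
      have : cs.length - i - 1 + 1 = cs.length - i := by omega
      rw [this]
    have hBlen : (pvBpass (ys.take (cs.length - i))).length = cs.length - i := by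
      rw [pvBpass_length, List.length_take, hlen]; omega
    have hBne : pvBpass (ys.take (cs.length - i)) ≠ [] := by
      intro hnil; rw [hnil] at hBlen; simp at hBlen; omega
    obtain ⟨Q, l, hQl⟩ : ∃ Q l, pvBpass (ys.take (cs.length - i)) = Q ++ [l] :=
      ⟨_, _, (List.dropLast_append_getLast hBne).symm⟩
    have hQlen : Q.length = cs.length - i - 1 := by
      rw [hQl] at hBlen; simp at hBlen; omega
    have hmemP : ∀ x ∈ pvBpass (ys.take (cs.length - i)), x ∈ ys.take (cs.length - i) :=
      fun x hx => pvBpass_mem hx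
    have hmax : ∀ x ∈ ys.take (cs.length - i), pvKey x ≤ pvKey l :=
      pvBpass_last_max _ Q l hQl
    have hZ : pvOuter cs cs.length (i+1) = Q ++ (l :: ys.drop (cs.length - i)) := by
      rw [hstep, hQl]; simp
    have hsub : cs.length - (i+1) = Q.length := by omega
    constructor
    · rw [hZ, hsub, List.drop_left]
      refine List.Pairwise.cons ?_ hsort
      intro b hb
      exact hle l (hmemP l (by rw [hQl]; simp)) b hb
    · rw [hZ, hsub, List.drop_left, List.take_left]
      intro a ha b hb
      have haB : a ∈ pvBpass (ys.take (cs.length - i)) := by rw [hQl]; simp [ha]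
      have haP : a ∈ ys.take (cs.length - i) := hmemP a haB
      rcases List.mem_cons.mp hb with rfl | hb
      · exact hmax a haP
      · exact hle a haP b hb

theorem pvSplit (ys : List Char) (k : Int) (hs : pvSortedK ys) (hk : ∀ c ∈ ys, k ≤ pvKey c) :
    ys = ys.filter (fun c => pvKey c == k) ++ ys.filter (fun c => !(pvKey c == k)) := by
  induction ys with
  | nil => rfl
  | cons c t ih =>
    have hpc : ∀ x ∈ t, pvKey c ≤ pvKey x := fun x hx => (List.pairwise_cons.mp hs).1 x hx
    have hts : pvSortedK t := (List.pairwise_cons.mp hs).2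
    by_cases hc : pvKey c = k
    · have ihe := ih hts (fun x hx => hc ▸ hpc x hx)
      simp only [List.filter_cons, hc]
      simp only [BEq.rfl, if_pos]
      simpa using ihe
    · have hlt : k < pvKey c := lt_of_le_of_ne (hk c (by simp)) (fun e => hc e.symm)
      have h1 : (c :: t).filter (fun c => pvKey c == k) = [] := by
        rw [List.filter_eq_nil_iff]
        intro x hx
        rcases List.mem_cons.mp hx with rfl | hx
        · simpa using hc
        · have := hpc x hx; simp; omega
      have h2 : (c :: t).filter (fun c => !(pvKey c == k)) = c :: t := by
        rw [List.filter_eq_self]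
        intro x hx
        rcases List.mem_cons.mp hx with rfl | hx
        · simpa using hc
        · have := hpc x hx; simp; omega
      rw [h1, h2]; rfl

theorem pvCanon (K : List Int) (ys : List Char) (hK : K.Pairwise (· < ·))
    (hs : pvSortedK ys) (hc : ∀ c ∈ ys, pvKey c ∈ K) :
    K.flatMap (fun k => ys.filter (fun c => pvKey c == k)) = ys := by
  induction K generalizing ys with
  | nil =>
    rcases ys with _ | ⟨c, t⟩
    · rfl
    · exact absurd (hc c (by simp)) (by simp)
  | cons k K ih =>
    have hkK : ∀ k' ∈ K, k < k' := fun k' h => (List.pairwise_cons.mp hK).1 k' h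
    have hge : ∀ c ∈ ys, k ≤ pvKey c := by
      intro c hcy
      rcases List.mem_cons.mp (hc c hcy) with he | hm
      · omega
      · exact le_of_lt (hkK _ hm)
    have hsplit := pvSplit ys k hs hge
    set R := ys.filter (fun c => !(pvKey c == k)) with hR
    have hRs : pvSortedK R := List.Pairwise.sublist List.filter_sublist hs
    have hRc : ∀ c ∈ R, pvKey c ∈ K := by
      intro c hcR
      have := List.mem_filter.mp hcR
      rcases List.mem_cons.mp (hc c this.1) with he | hm
      · simp at this; omega
      · exact hm
    have hfil : ∀ k' ∈ K, ys.filter (fun c => pvKey c == k') = R.filter (fun c => pvKey c == k') := by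
      intro k' hk'
      have hne : k' ≠ k := by have := hkK k' hk'; omega
      rw [hR, List.filter_filter]
      apply List.filter_congr
      intro x _
      by_cases hx : pvKey x = k' <;> simp [hx, hne]
    have : K.flatMap (fun k' => ys.filter (fun c => pvKey c == k'))
         = K.flatMap (fun k' => R.filter (fun c => pvKey c == k')) := by
      rw [List.flatMap_def, List.flatMap_def]
      congr 1
      exact List.map_congr_left hfil
    rw [List.flatMap_cons, this, ih R (List.pairwise_cons.mp hK).2 hRs hRc]
    exact hsplit.symm

theorem pv_inner_eq (m : Nat) (cs : List Char) :
    (PySem.List.pyRange 0 (m : Int) 1).foldl (fun cs j =>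
        if pvKey (PySem.List.pyGetD cs j ' ') > pvKey (PySem.List.pyGetD cs (j+1) ' ')
        then (cs.set j.toNat (PySem.List.pyGetD cs (j+1) ' ')).set (j.toNat+1)
               (PySem.List.pyGetD cs j ' ')
        else cs) cs = pvPass cs m := by
  induction m with
  | zero => simp only [Nat.cast_zero]; rw [PySem.List.pyRange_one_eq_nil (le_refl 0)]; rfl
  | succ m ih =>
    have hcast : ((m+1 : Nat) : Int) = (m : Int) + 1 := by push_cast; ring
    rw [hcast, PySem.List.pyRange_one_succ_right (by positivity), List.foldl_append, ih]
    show _ = pvStepN (pvPass cs m) m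
    have h1 : ((m : Int) + 1) = ((m+1 : Nat) : Int) := hcast.symm
    simp only [List.foldl_cons, List.foldl_nil, h1, PySem.List.pyGetD_natCast, Int.toNat_natCast]
    rfl

theorem pv_sortWord_eq_outer (w : String) :
    pvSortWord w = String.ofList (pvOuter w.toList w.toList.length w.toList.length) := by
  have main : ∀ (n : Nat), n = w.toList.length → ∀ j : Nat, j ≤ n →
      (PySem.List.pyRange 0 (j : Int) 1).foldl (fun cs i =>
        (PySem.List.pyRange 0 ((n : Int) - i - 1) 1).foldl (fun cs j =>
          if pvKey (PySem.List.pyGetD cs j ' ') > pvKey (PySem.List.pyGetD cs (j+1) ' ')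
          then (cs.set j.toNat (PySem.List.pyGetD cs (j+1) ' ')).set (j.toNat+1)
                 (PySem.List.pyGetD cs j ' ')
          else cs) cs) w.toList = pvOuter w.toList n j := by
    intro n hn j hj
    induction j with
    | zero => simp only [Nat.cast_zero]; rw [PySem.List.pyRange_one_eq_nil (le_refl 0)]; rfl
    | succ j ihj =>
      have hcast : ((j+1 : Nat) : Int) = (j : Int) + 1 := by push_cast; ring
      rw [hcast, PySem.List.pyRange_one_succ_right (by positivity), List.foldl_append,
          ihj (by omega)]
      show (PySem.List.pyRange 0 ((n : Int) - (j : Int) - 1) 1).foldl _ _ = pvOuter w.toList n (j+1)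
      have hb : (n : Int) - (j : Int) - 1 = ((n - j - 1 : Nat) : Int) := by
        have : j < n := by omega
        omega
      rw [hb, pv_inner_eq]
      rfl
  exact congrArg String.ofList (main w.toList.length rfl w.toList.length (le_refl _))

theorem pvWord_eq (w : String) : pvSortWord w = pvSortWordB w := by
  set cs := w.toList with hcs
  set n := cs.length with hn
  set ys := pvOuter cs n n with hys
  have hsort : pvSortedK ys := by
    have h := (pvOuter_inv cs n (le_refl n)).1
    rw [show n - n = 0 by omega] at h
    simpa using h
  have hfil : ∀ k, ys.filter (fun c => pvKey c == k) = cs.filter (fun c => pvKey c == k) :=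
    fun k => pvOuter_filter cs n (le_refl n) k
  set K := PySem.List.sorted (PySem.Set.ofList (cs.map pvKey)) (fun x => x) false with hK
  have hKlt : K.Pairwise (· < ·) := PySem.List.sorted_ofList_pairwise_lt _
  have hcov : ∀ c ∈ ys, pvKey c ∈ K := by
    intro c hcy
    have hmemf : c ∈ ys.filter (fun c' => pvKey c' == pvKey c) :=
      List.mem_filter.mpr ⟨hcy, by simp⟩
    rw [hfil] at hmemf
    have hccs : c ∈ cs := (List.mem_filter.mp hmemf).1
    rw [hK, PySem.List.mem_sorted, PySem.Set.mem_ofList]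
    exact List.mem_map.mpr ⟨c, hccs, rfl⟩
  have hcanon := pvCanon K ys hKlt hsort hcov
  have hfe : (fun k => ys.filter (fun c => pvKey c == k)) = (fun k => cs.filter (fun c => pvKey c == k)) :=
    funext hfil
  rw [hfe] at hcanon
  rw [pv_sortWord_eq_outer w]
  show String.ofList ys = pvSortWordB w
  rw [← hcanon]
  rfl

theorem pv_top (words : List String) : alphabetical words = alphabetical_alt words := by
  unfold alphabetical alphabetical_alt
  rw [PySem.List.foldl_pyRange_zero_pyGetD' words "" (fun acc w => acc ++ [pvSortWord w]) []]
  rw [PySem.List.foldl_append_singleton_eq_map]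
  simp only [List.nil_append]
  exact List.map_congr_left (fun w _ => pvWord_eq w)

-- ===== VERDICT (by name: the statement is the Claim_ definition above) =====
theorem alphabetical_spec : Claim_equal_alphabetical := by
  intro words _dom
  exact pv_top words
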